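-- pv_equiv track=rewrite | github.com/issdandavis/SCBE-AETHERMOORE | scripts/system/customer_connector_template.py | match_service
-- ===== SOURCE A (Python) =====
-- from typing import Any
--
-- def match_service(services: list[dict[str, Any]], domain: str) -> dict[str, Any]:
--     d = domain.lower().strip()
--     best: dict[str, Any] = {}
--     best_len = -1
--     for svc in services:
--         s_domain = str(svc.get("domain", "")).lower().strip()
--         if not s_domain:
--             continue
--         if d == s_domain or d.endswith("." + s_domain) or s_domain in d:
--             if len(s_domain) > best_len:
--                 best = svc
--                 best_len = len(s_domain)
--     return best
-- ===== SOURCE B (Python) =====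
-- from typing import Any
--
-- def match_service(services: list[dict[str, Any]], domain: str) -> dict[str, Any]:
--     d = domain.lower().strip()
--
--     def norm(svc):
--         return str(svc.get("domain", "")).lower().strip()
--
--     def ok(svc):
--         s = norm(svc)
--         return bool(s) and (d == s or d.endswith("." + s) or s in d)
--
--     matches = [svc for svc in services if ok(svc)]
--     if not matches:
--         return {}
--     top = max(len(norm(svc)) for svc in matches)
--     return next(svc for svc in matches if len(norm(svc)) == top)
-- ===== Notes on version B (the rewrite author's own statement) =====
-- stated objective: alternative
-- what changed: Replaced A's single pass with a best/best_len running-max accumulator by a stateless three-stage decomposition: filter the matching services, take the max normalized-domain length with max(), and return the first match of that length.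
import Mathlib
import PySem

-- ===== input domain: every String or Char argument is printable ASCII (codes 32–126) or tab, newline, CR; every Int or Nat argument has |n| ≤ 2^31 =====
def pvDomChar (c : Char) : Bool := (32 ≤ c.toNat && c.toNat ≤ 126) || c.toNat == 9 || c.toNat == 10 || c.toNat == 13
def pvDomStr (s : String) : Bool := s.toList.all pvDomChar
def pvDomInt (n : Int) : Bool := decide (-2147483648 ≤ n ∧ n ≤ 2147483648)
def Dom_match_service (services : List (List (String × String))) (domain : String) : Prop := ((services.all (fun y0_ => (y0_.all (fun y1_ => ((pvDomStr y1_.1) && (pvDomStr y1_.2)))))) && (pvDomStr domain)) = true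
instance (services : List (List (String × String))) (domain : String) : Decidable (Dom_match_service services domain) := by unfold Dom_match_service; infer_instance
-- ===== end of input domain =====

-- B changes the decomposition only (filter + max + first match instead of a running-max
-- accumulator); same asymptotic cost.

-- shared helpers: normalized service domain, and the match test (worked on List Char,
-- exact via PySem.Chars)
def msNorm (svc : List (String × String)) : List Char :=
  PySem.Chars.strip (PySem.Chars.lower ((PySem.Dict.mk svc).getD "domain" "").toList)

-- ===== PORT A =====
def match_service (services : List (List (String × String))) (domain : String) : List (String × String) :=
  let d := PySem.Chars.strip (PySem.Chars.lower domain.toList)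
  (services.foldl
    (fun (st : List (String × String) × Int) svc =>
      let s := msNorm svc
      if s = [] then st
      else if d == s || PySem.Chars.endswith d ('.' :: s) || PySem.Chars.isIn s d then
        if (PySem.Chars.len s : Int) > st.2 then (svc, (PySem.Chars.len s : Int)) else st
      else st)
    ([], -1)).1

-- ===== PORT B =====
def msOk (d : List Char) (svc : List (String × String)) : Bool :=
  let s := msNorm svc
  !(s == []) && (d == s || PySem.Chars.endswith d ('.' :: s) || PySem.Chars.isIn s d)

def match_service_alt (services : List (List (String × String))) (domain : String) : List (String × String) :=
  let d := PySem.Chars.strip (PySem.Chars.lower domain.toList)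
  let ms := services.filter (msOk d)
  match ms with
  | [] => []
  | _ :: _ =>
    let top := ((PySem.List.max? (ms.map (fun svc => PySem.Chars.len (msNorm svc))) (fun x => x)).getD 0)
    (ms.find? (fun svc => PySem.Chars.len (msNorm svc) == top)).getD []

-- ===== PRECONDITION & SPEC =====
def Spec_match_service (services : List (List (String × String))) (domain : String) (out : List (String × String)) : Prop := out = match_service_alt services domain
instance (services : List (List (String × String))) (domain : String) (out : List (String × String)) : Decidable (Spec_match_service services domain out) := by unfold Spec_match_service; infer_instance

-- ===== CLAIM (what is proved, stated in full; the proofs are below) =====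
def Claim_equal_match_service : Prop := ∀ (services : List (List (String × String))) (domain : String), Dom_match_service services domain → Spec_match_service services domain (match_service services domain)

-- ===== LEMMAS AND PROOFS =====

-- normalized-domain length, and A's running-max step
def msF (svc : List (String × String)) : Int := PySem.Chars.len (msNorm svc)

def msG (st : List (String × String) × Int) (svc : List (String × String)) : List (String × String) × Int :=
  if msF svc > st.2 then (svc, msF svc) else st

lemma msBody_eq (d : List Char) (st : List (String × String) × Int) (svc : List (String × String)) :
    (let s := msNorm svc
     if s = [] then st
     else if d == s || PySem.Chars.endswith d ('.' :: s) || PySem.Chars.isIn s d then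
       if (PySem.Chars.len s : Int) > st.2 then (svc, (PySem.Chars.len s : Int)) else st
     else st)
    = if msOk d svc then msG st svc else st := by
  simp only [msOk, msG, msF]
  by_cases h : msNorm svc = [] <;> simp [h]

lemma foldl_filter_body (d : List Char) (l : List (List (String × String))) (st : List (String × String) × Int) :
    l.foldl (fun st svc => if msOk d svc then msG st svc else st) st
      = (l.filter (msOk d)).foldl msG st := by
  induction l generalizing st with
  | nil => rfl
  | cons a t ih =>
      by_cases h : msOk d a <;> simp [h, ih]

lemma le_foldl_maxf (t : List (List (String × String))) (i : Int) :
    i ≤ t.foldl (fun m x => max m (msF x)) i := by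
  induction t generalizing i with
  | nil => simp
  | cons a t ih => exact le_trans (le_max_left _ _) (ih _)

-- characterisation of the running-max fold
lemma foldl_msG_eq (q : List (List (String × String))) (best : List (String × String)) (blen : Int) :
    q.foldl msG (best, blen)
      = (if q.foldl (fun m x => max m (msF x)) blen > blen
         then ((q.find? (fun x => msF x == q.foldl (fun m x => max m (msF x)) blen)).getD [],
               q.foldl (fun m x => max m (msF x)) blen)
         else (best, blen)) := by
  induction q generalizing best blen with
  | nil => simp
  | cons a t ih =>
      simp only [List.foldl_cons]
      by_cases h : msF a > blen
      · rw [show msG (best, blen) a = (a, msF a) from if_pos h, max_eq_right (le_of_lt h), ih]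
        have hMfa : msF a ≤ t.foldl (fun m x => max m (msF x)) (msF a) := le_foldl_maxf t (msF a)
        by_cases h2 : t.foldl (fun m x => max m (msF x)) (msF a) > msF a
        · rw [if_pos h2, if_pos (lt_trans h h2),
              List.find?_cons_of_neg (by simp only [beq_iff_eq]; omega)]
        · have hMe : t.foldl (fun m x => max m (msF x)) (msF a) = msF a :=
            le_antisymm (not_lt.mp h2) hMfa
          rw [if_neg h2, hMe, if_pos h,
              List.find?_cons_of_pos (by simp only [beq_iff_eq])]
          rfl
      · rw [show msG (best, blen) a = (best, blen) from if_neg h,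
            max_eq_left (not_lt.mp h), ih]
        by_cases h2 : t.foldl (fun m x => max m (msF x)) blen > blen
        · rw [if_pos h2, if_pos h2,
              List.find?_cons_of_neg (by
                simp only [beq_iff_eq]
                have := le_foldl_maxf t blen
                omega)]
        · rw [if_neg h2, if_neg h2]

lemma msF_nonneg (x : List (String × String)) : (0 : Int) ≤ msF x := by
  simp [msF, PySem.Chars.len_eq]

-- ===== VERDICT (by name: the statement is the Claim_ definition above) =====
theorem match_service_spec : Claim_equal_match_service := by
  intro services domain _
  unfold Spec_match_service match_service match_service_alt
  simp only []
  set d := PySem.Chars.strip (PySem.Chars.lower domain.toList) with hd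
  have hbody : (fun (st : List (String × String) × Int) svc =>
        let s := msNorm svc
        if s = [] then st
        else if d == s || PySem.Chars.endswith d ('.' :: s) || PySem.Chars.isIn s d then
          if (PySem.Chars.len s : Int) > st.2 then (svc, (PySem.Chars.len s : Int)) else st
        else st)
      = (fun st svc => if msOk d svc then msG st svc else st) := by
    funext st svc; exact msBody_eq d st svc
  rw [hbody, foldl_filter_body]
  cases hq : services.filter (msOk d) with
  | nil => simp
  | cons a t =>
      rw [foldl_msG_eq]
      simp only [List.foldl_cons, List.map_cons]
      have hfa0 : (0:Int) ≤ msF a := msF_nonneg a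
      rw [show max (-1 : Int) (msF a) = msF a from max_eq_right (by omega)]
      have hMfa : msF a ≤ t.foldl (fun m x => max m (msF x)) (msF a) := le_foldl_maxf t (msF a)
      rw [if_pos (show t.foldl (fun m x => max m (msF x)) (msF a) > (-1:Int) by omega)]
      have htop : ((PySem.List.max? (msF a :: t.map (fun svc => PySem.Chars.len (msNorm svc))) (fun x => x)).getD 0)
          = t.foldl (fun m x => max m (msF x)) (msF a) := by
        rw [PySem.List.max?_id_cons, Option.getD_some, List.foldl_map]
        rfl
      simp only [msF] at htop ⊢
      rw [htop]
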